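-- pv_equiv track=rewrite | github.com/danipy2/leetCode | 2076-sum-of-digits-of-string-after-convert/sum-of-digits-of-string-after-convert.py | getLucky
-- ===== SOURCE A (Python) =====
-- def getLucky(s: str, k: int) -> int:
--     st = ""
--     for i in s:
--         st+= str(ord(i)-ord('a')+1)
--
--     total =sum(int(i) for i in st)
--     while k>1:
--         k-=1
--         total = sum(int(i) for i in str(total))
--     return total
-- ===== SOURCE B (Python) =====
-- def getLucky(s: str, k: int) -> int:
--     # digit sum by pure arithmetic (no string conversion anywhere)
--     def digitsum(n):
--         return 0 if n <= 0 else n % 10 + digitsum(n // 10)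
--     total = 0
--     for c in s:
--         total += digitsum(ord(c) - 96)
--     rounds = k - 1
--     # once total is a single digit, digit-summing is a no-op: stop early
--     while rounds > 0 and total > 9:
--         total = digitsum(total)
--         rounds -= 1
--     return total
-- ===== Notes on version B (the rewrite author's own statement) =====
-- stated objective: faster
-- what changed: B does no string conversion at all: digit sums are computed arithmetically by recursive mod/floordiv instead of building and re-parsing decimal strings, and the k-1 rounds loop exits early once the total is a single digit (a fixed point of digit-summing).
import Mathlib
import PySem

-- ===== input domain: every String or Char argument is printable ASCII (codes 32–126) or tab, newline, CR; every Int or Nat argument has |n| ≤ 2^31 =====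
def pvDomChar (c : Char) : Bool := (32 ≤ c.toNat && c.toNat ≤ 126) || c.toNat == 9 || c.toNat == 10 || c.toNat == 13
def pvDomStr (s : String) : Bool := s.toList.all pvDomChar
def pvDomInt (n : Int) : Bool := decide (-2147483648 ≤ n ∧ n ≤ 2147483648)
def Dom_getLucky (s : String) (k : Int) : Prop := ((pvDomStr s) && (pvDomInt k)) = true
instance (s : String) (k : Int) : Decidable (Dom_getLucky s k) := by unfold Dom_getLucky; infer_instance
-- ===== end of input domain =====

-- B does no string conversion at all (digit sums by recursive mod/floordiv arithmetic) and
-- its rounds loop exits early once the total is a single digit, a fixed point of digit-summing.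

-- ===== PORT A =====
-- int(ch) for a single character ch (none = ValueError; unreachable default under Pre_)
def pvDigitVal (c : Char) : Int := (PySem.Int.ofStr? (String.mk [c])).getD 0

-- sum(int(i) for i in st)
def pvSumDigitChars (l : List Char) : Int := l.foldl (fun acc c => acc + pvDigitVal c) 0

-- while k>1: k-=1; total = sum(int(i) for i in str(total))
def pvLoopA (k : Int) (total : Int) : Int :=
  if k > 1 then pvLoopA (k - 1) (pvSumDigitChars (PySem.Int.toStr total).toList) else total
termination_by k.toNat
decreasing_by omega

def getLucky (s : String) (k : Int) : Int :=
  let st := s.toList.foldl (fun st c => st ++ PySem.Int.toStr ((c.toNat : Int) - 97 + 1)) ""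
  let total := pvSumDigitChars st.toList
  pvLoopA k total

-- ===== PORT B =====
-- digitsum(n) = 0 if n <= 0 else n % 10 + digitsum(n // 10)
def pvDigitsumB (n : Int) : Int :=
  if h : n ≤ 0 then 0
  else PySem.Int.mod n 10 + pvDigitsumB (PySem.Int.floordiv n 10)
termination_by n.toNat
decreasing_by
  have h10 : (0:Int) < 10 := by norm_num
  rw [PySem.Int.floordiv_eq_ediv_of_pos h10]
  omega

-- while rounds > 0 and total > 9: total = digitsum(total); rounds -= 1
def pvLoopB (rounds : Int) (total : Int) : Int :=
  if rounds > 0 ∧ total > 9 then pvLoopB (rounds - 1) (pvDigitsumB total) else total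
termination_by rounds.toNat
decreasing_by omega

def getLucky_alt (s : String) (k : Int) : Int :=
  let total := s.toList.foldl (fun a c => a + pvDigitsumB ((c.toNat : Int) - 96)) 0
  pvLoopB (k - 1) total

-- ===== PRECONDITION & SPEC =====
-- A raises ValueError when some character has code < 96 (ord(c)-96 is negative, so the
-- digit string contains '-' and int('-') raises); Pre_ admits exactly the inputs on which A returns.
def Pre_getLucky (s : String) (k : Int) : Prop := (s.toList.all (fun c => 96 ≤ c.toNat)) = true
instance (s : String) (k : Int) : Decidable (Pre_getLucky s k) := by unfold Pre_getLucky; infer_instance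

def pvWitness_getLucky : String × Int := ("zoo", 3)

def Spec_getLucky (s : String) (k : Int) (out : Int) : Prop := out = getLucky_alt s k
instance (s : String) (k : Int) (out : Int) : Decidable (Spec_getLucky s k out) := by unfold Spec_getLucky; infer_instance

-- ===== CLAIM (what is proved, stated in full; the proofs are below) =====
def Claim_equal_getLucky : Prop := ∀ (s : String) (k : Int), Dom_getLucky s k → Pre_getLucky s k → Spec_getLucky s k (getLucky s k)

-- ===== LEMMAS AND PROOFS =====

theorem foldl_add_shift {β : Type} (g : β → Int) (l : List β) (x : Int) :
    l.foldl (fun a c => a + g c) x = x + l.foldl (fun a c => a + g c) 0 := by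
  induction l generalizing x with
  | nil => simp
  | cons c u ih =>
    simp only [List.foldl_cons]
    rw [ih, ih (0 + g c)]
    ring

theorem sumDigitChars_cons (c : Char) (l : List Char) :
    pvSumDigitChars (c :: l) = pvDigitVal c + pvSumDigitChars l := by
  unfold pvSumDigitChars
  simp only [List.foldl_cons, zero_add]
  exact foldl_add_shift _ l _

theorem sumDigitChars_append (l1 l2 : List Char) :
    pvSumDigitChars (l1 ++ l2) = pvSumDigitChars l1 + pvSumDigitChars l2 := by
  induction l1 with
  | nil => simp [pvSumDigitChars]
  | cons c t ih =>
    simp only [List.cons_append, sumDigitChars_cons, ih]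
    ring

-- value of a digit character
theorem digitVal_digitChar (d : Nat) (hd : d < 10) : pvDigitVal (Nat.digitChar d) = (d : Int) := by
  interval_cases d <;> decide

-- char-sum of core's digit printer = sum of Nat.digits
theorem sumDigitChars_toDigitsCore (fuel a : Nat) (ds : List Char) (h : a < fuel) :
    pvSumDigitChars (Nat.toDigitsCore 10 fuel a ds)
      = ((Nat.digits 10 a).sum : Int) + pvSumDigitChars ds := by
  induction fuel generalizing a ds with
  | zero => omega
  | succ f ih =>
    rw [Nat.toDigitsCore]
    by_cases h0 : a / 10 = 0
    · simp only [h0, if_true]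
      rw [sumDigitChars_cons, digitVal_digitChar _ (Nat.mod_lt _ (by norm_num))]
      have ha : a < 10 := by omega
      rcases Nat.eq_zero_or_pos a with rfl | hpos
      · simp
      · rw [Nat.digits_def' (by norm_num : 1 < 10) hpos, h0]
        simp [Nat.mod_eq_of_lt ha]
    · simp only [h0, if_false]
      have hpos : 0 < a := by
        rcases Nat.eq_zero_or_pos a with rfl | hpos
        · simp at h0
        · exact hpos
      have hlt : a / 10 < f := by
        have := Nat.div_lt_self hpos (by norm_num : 1 < 10)
        omega
      rw [ih _ _ hlt, sumDigitChars_cons, digitVal_digitChar _ (Nat.mod_lt _ (by norm_num))]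
      rw [Nat.digits_def' (by norm_num : 1 < 10) hpos]
      push_cast [List.map_cons, List.sum_cons]
      ring

-- A's per-number digit sum (over str(n)) = sum of Nat.digits, for n ≥ 0
theorem sumDigitChars_toStr (n : Int) (hn : 0 ≤ n) :
    pvSumDigitChars (PySem.Int.toStr n).toList = ((Nat.digits 10 n.toNat).sum : Int) := by
  rw [PySem.Int.toList_toStr]
  unfold PySem.Int.toChars
  rw [if_neg (by omega)]
  exact sumDigitChars_toDigitsCore _ _ _ (Nat.lt_succ_self _)

-- B's arithmetic digit sum = sum of Nat.digits, for n ≥ 0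
theorem digitsumB_natCast (a : Nat) : pvDigitsumB (a : Int) = ((Nat.digits 10 a).sum : Int) := by
  induction a using Nat.strong_induction_on with
  | _ a ih =>
    rw [pvDigitsumB]
    by_cases h0 : (a : Int) ≤ 0
    · have : a = 0 := by omega
      simp [this]
    · rw [dif_neg h0]
      have hpos : 0 < a := by omega
      rw [(by exact_mod_cast PySem.Int.mod_natCast a 10 :
            PySem.Int.mod (a : Int) 10 = ((a % 10 : Nat) : Int)),
        (by exact_mod_cast PySem.Int.floordiv_natCast a 10 :
            PySem.Int.floordiv (a : Int) 10 = ((a / 10 : Nat) : Int)),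
        ih (a / 10) (Nat.div_lt_self hpos (by norm_num)),
        Nat.digits_def' (by norm_num : 1 < 10) hpos]
      push_cast [List.map_cons, List.sum_cons]
      ring

theorem digitsumB_eq_toStr (n : Int) (hn : 0 ≤ n) :
    pvDigitsumB n = pvSumDigitChars (PySem.Int.toStr n).toList := by
  rw [sumDigitChars_toStr n hn]
  have : n = ((n.toNat : Nat) : Int) := by omega
  conv_lhs => rw [this]
  rw [digitsumB_natCast]

theorem digitsumB_nonneg (n : Int) : 0 ≤ pvDigitsumB n := by
  by_cases h0 : n ≤ 0
  · rw [pvDigitsumB, dif_pos h0]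
  · have : n = ((n.toNat : Nat) : Int) := by omega
    rw [this, digitsumB_natCast]
    positivity

theorem digitsumB_single (n : Int) (h0 : 0 ≤ n) (h9 : n ≤ 9) : pvDigitsumB n = n := by
  rw [pvDigitsumB]
  by_cases h : n ≤ 0
  · rw [dif_pos h]; omega
  · rw [dif_neg h]
    have hm : PySem.Int.mod n 10 = n := by
      rw [PySem.Int.mod_eq_emod_of_pos (by norm_num)]
      omega
    have hd : PySem.Int.floordiv n 10 = 0 := by
      rw [PySem.Int.floordiv_eq_ediv_of_pos (by norm_num)]
      omega
    rw [hm, hd]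
    simp [pvDigitsumB]

-- the two rounds loops agree on nonnegative totals
theorem loopA_eq_loopB (k t : Int) (ht : 0 ≤ t) : pvLoopA k t = pvLoopB (k - 1) t := by
  generalize hfuel : (k - 1).toNat = n
  induction n generalizing k t with
  | zero =>
    rw [pvLoopA, pvLoopB, if_neg (by omega), if_neg (by omega)]
  | succ m ih =>
    rw [pvLoopA, pvLoopB, if_pos (by omega : k > 1)]
    by_cases h9 : t > 9
    · rw [if_pos ⟨by omega, h9⟩, ← digitsumB_eq_toStr t ht,
        ih (k - 1) _ (digitsumB_nonneg t) (by omega)]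
    · rw [if_neg (by omega)]
      rw [← digitsumB_eq_toStr t ht, digitsumB_single t ht (by omega),
        ih (k - 1) t ht (by omega), pvLoopB, if_neg (by omega)]

-- A's string-building loop produces the concatenation of the per-letter digit strings
theorem pvBuild_eq (l : List Char) (init : String) :
    (l.foldl (fun st c => st ++ PySem.Int.toStr ((c.toNat : Int) - 97 + 1)) init).toList
      = init.toList ++ l.flatMap (fun c => (PySem.Int.toStr ((c.toNat : Int) - 96)).toList) := by
  induction l generalizing init with
  | nil => simp
  | cons c t ih =>
    simp only [List.foldl_cons, List.flatMap_cons, ih]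
    have : (c.toNat : Int) - 97 + 1 = (c.toNat : Int) - 96 := by ring
    simp [this]

-- first pass: digit sum of the concatenated string = B's per-letter arithmetic pass
theorem pvFirst_eq (l : List Char) (hl : ∀ c ∈ l, 96 ≤ c.toNat) :
    pvSumDigitChars (l.flatMap (fun c => (PySem.Int.toStr ((c.toNat : Int) - 96)).toList))
      = l.foldl (fun a c => a + pvDigitsumB ((c.toNat : Int) - 96)) 0 := by
  induction l with
  | nil => rfl
  | cons c t ih =>
    have hc : (0:Int) ≤ (c.toNat : Int) - 96 := by
      have := hl c (List.mem_cons_self ..)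
      omega
    simp only [List.flatMap_cons, List.foldl_cons, zero_add, sumDigitChars_append]
    rw [ih (fun x hx => hl x (List.mem_cons_of_mem _ hx)),
      foldl_add_shift _ t (pvDigitsumB ((c.toNat : Int) - 96)), digitsumB_eq_toStr _ hc]

theorem first_nonneg (l : List Char) (x : Int) (hx : 0 ≤ x) :
    0 ≤ l.foldl (fun a c => a + pvDigitsumB ((c.toNat : Int) - 96)) x := by
  induction l generalizing x with
  | nil => exact hx
  | cons c t ih =>
    simp only [List.foldl_cons]
    exact ih _ (by have := digitsumB_nonneg ((c.toNat : Int) - 96); omega)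

-- ===== VERDICT (by name: the statement is the Claim_ definition above) =====
theorem getLucky_spec : Claim_equal_getLucky := by
  intro s k _ hpre
  unfold Spec_getLucky getLucky getLucky_alt
  simp only []
  have hl : ∀ c ∈ s.toList, 96 ≤ c.toNat := by
    intro c hc
    have := List.all_eq_true.mp hpre c hc
    simpa using this
  rw [pvBuild_eq, show ("" : String).toList = [] from rfl, List.nil_append, pvFirst_eq _ hl]
  exact loopA_eq_loopB _ _ (first_nonneg _ _ le_rfl)
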